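-- pv_equiv track=rewrite | github.com/simplepie/simplepie | markdownify.py | get_one
-- ===== SOURCE A (Python) =====
-- from collections.abc import Iterable
-- from typing import Optional, TypeVar
--
-- T = TypeVar('T')
--
-- def get_one(iterable: Iterable[T]) -> Optional[T]:
-- 	# Sentinel until we have it natively:
-- 	# https://peps.python.org/pep-0661/
-- 	not_given = object()
-- 	return_result = not_given
-- 	for result in iterable:
-- 		if return_result is not not_given:
-- 			return None
-- 		return_result = result
--
-- 	if return_result is not_given:
-- 		return None
--
-- 	return return_result
-- ===== SOURCE B (Python) =====
-- def get_one(iterable):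
--     # Exception-driven tuple unpacking: succeeds iff the iterable
--     # yields exactly one element; otherwise ValueError -> None.
--     try:
--         (result,) = iterable
--     except ValueError:
--         return None
--     return result
-- ===== Notes on version B (the rewrite author's own statement) =====
-- stated objective: idiomatic
-- what changed: Replaced the explicit for-loop with a sentinel flag by exception-driven single-element tuple unpacking ('(result,) = iterable' with ValueError meaning zero or many elements).
import Mathlib
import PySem

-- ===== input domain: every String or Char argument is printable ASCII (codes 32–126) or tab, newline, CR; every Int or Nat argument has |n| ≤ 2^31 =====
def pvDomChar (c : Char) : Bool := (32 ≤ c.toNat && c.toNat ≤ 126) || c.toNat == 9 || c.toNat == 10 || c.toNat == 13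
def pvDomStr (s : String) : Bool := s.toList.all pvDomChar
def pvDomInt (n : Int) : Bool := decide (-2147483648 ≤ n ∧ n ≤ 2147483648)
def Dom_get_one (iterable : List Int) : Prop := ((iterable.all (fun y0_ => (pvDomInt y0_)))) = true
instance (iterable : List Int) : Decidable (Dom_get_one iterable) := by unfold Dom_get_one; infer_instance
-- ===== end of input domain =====

-- B replaces the loop-with-sentinel by exception-driven one-element tuple unpacking (objective: idiomatic).

-- ===== PORT A =====
-- loop body: return_result is an Option Int (none = not_given); early 'return None' when a second element arrives
def get_one_loop : List Int → Option Int → Option Int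
  | [], acc =>
      -- after the loop: 'if return_result is not_given: return None' (none stays none)
      match acc with
      | none => none
      | some r => some r
  | x :: xs, acc =>
      match acc with
      | some _ => none            -- 'if return_result is not not_given: return None'
      | none => get_one_loop xs (some x)

def get_one (iterable : List Int) : Option Int :=
  get_one_loop iterable none

-- ===== PORT B =====
-- '(result,) = iterable': unpacking succeeds exactly on a one-element list, ValueError → none otherwise
def get_one_alt (iterable : List Int) : Option Int :=
  match iterable with
  | [result] => some result       -- unpacking succeeded
  | _ => none                     -- ValueError: zero or more than one element

-- ===== PRECONDITION & SPEC =====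
def Spec_get_one (iterable : List Int) (out : Option Int) : Prop := out = get_one_alt iterable
instance (iterable : List Int) (out : Option Int) : Decidable (Spec_get_one iterable out) := by unfold Spec_get_one; infer_instance

-- ===== CLAIM =====
def Claim_equal_get_one : Prop := ∀ (iterable : List Int), Dom_get_one iterable → Spec_get_one iterable (get_one iterable)

-- ===== LEMMAS AND PROOFS =====

-- ===== VERDICT =====
theorem get_one_spec : Claim_equal_get_one := by
  intro iterable _
  unfold Spec_get_one get_one get_one_alt
  match iterable with
  | [] => rfl
  | [x] => rfl
  | x :: y :: rest => rfl
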